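-- pv_equiv track=rewrite | github.com/HeroZ-Dodge/a-share-convertible-bond-skill | scripts/strategies/monitor_strategy.py | find_trading_day_offset
-- ===== SOURCE A (Python) =====
-- from typing import Dict, List, Optional, Any
--
-- def find_trading_day_offset(kline_dict: Dict[str, Dict], base_date: str,
--                              offset: int) -> Optional[str]:
--     """
--     在K线数据中从 base_date 起偏移 offset 个交易日
--
--     Args:
--         kline_dict: {date: {open, close, ...}}
--         base_date: 基准日期 'YYYY-MM-DD'
--         offset: 偏移天数（正数=向后）
--
--     Returns:
--         目标日期字符串，找不到返回 None
--     """
--     sorted_dates = sorted(kline_dict.keys())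
--     base_idx = None
--     for i, d in enumerate(sorted_dates):
--         if d >= base_date:
--             base_idx = i
--             break
--     if base_idx is None or base_idx + offset >= len(sorted_dates):
--         return None
--     return sorted_dates[base_idx + offset]
-- ===== SOURCE B (Python) =====
-- from typing import Dict, List, Optional, Any
--
-- def find_trading_day_offset(kline_dict: Dict[str, Dict], base_date: str,
--                              offset: int) -> Optional[str]:
--     """Binary search for the first trading day >= base_date, then bounds-checked offset."""
--     dates = sorted(kline_dict)
--     lo, hi = 0, len(dates)
--     while lo < hi:
--         mid = (lo + hi) // 2
--         if dates[mid] < base_date: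
--             lo = mid + 1
--         else:
--             hi = mid
--     if lo == len(dates):
--         return None
--     idx = lo + offset
--     if 0 <= idx < len(dates):
--         return dates[idx]
--     return None
-- ===== Notes on version B (the rewrite author's own statement) =====
-- stated objective: alternative
-- what changed: The linear scan for the first date >= base_date is replaced by a hand-written binary search on the sorted date list, and the final index is bounds-checked instead of using Python's wrapping negative indexing.
-- intended difference: When a date >= base_date exists but base_idx+offset is negative yet >= -len, A's negative list index wraps around and it returns a date from the END of the calendar (a later date despite a negative offset), while B returns None, the intended answer when there are not enough earlier trading days. — e.g. on find_trading_day_offset([("a", []), ("b", [])], "b", -2): A returns some "b", B returns none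
import Mathlib
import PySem

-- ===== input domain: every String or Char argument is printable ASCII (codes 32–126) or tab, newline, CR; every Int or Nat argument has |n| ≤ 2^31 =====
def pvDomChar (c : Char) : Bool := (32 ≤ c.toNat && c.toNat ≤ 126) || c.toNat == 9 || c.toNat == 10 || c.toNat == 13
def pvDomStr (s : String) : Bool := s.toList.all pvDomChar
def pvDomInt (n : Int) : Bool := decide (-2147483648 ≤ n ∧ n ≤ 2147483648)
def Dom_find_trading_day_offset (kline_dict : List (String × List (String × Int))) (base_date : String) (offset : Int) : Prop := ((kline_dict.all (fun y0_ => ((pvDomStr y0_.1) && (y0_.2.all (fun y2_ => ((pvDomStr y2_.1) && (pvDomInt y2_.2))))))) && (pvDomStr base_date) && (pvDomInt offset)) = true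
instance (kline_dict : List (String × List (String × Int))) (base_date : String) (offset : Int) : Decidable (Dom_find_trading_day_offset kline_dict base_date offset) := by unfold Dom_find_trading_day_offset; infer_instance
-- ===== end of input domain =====

-- B replaces A's linear first->= scan by a hand-written binary search and a bounds-checked
-- final index (alternative decomposition; the sort dominates both, so no speed is claimed).
-- A's negative-index wraparound on offsets reaching before the found date is documented as an
-- intended difference (D_ below).
-- Python string comparison is code-point lexicographic = Lean's `<` on `String.toList`
-- (PYSEM.md, str COMPARISON), used throughout; `d >= base_date` is ported as `¬ d < base_date`.

-- ===== PORT A =====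
-- A's `for i, d in enumerate(sorted_dates): if d >= base_date: base_idx = i; break`
def pvScanA (base_date : String) : List String → Nat → Option Nat
  | [], _ => none
  | d :: rest, i => if d.toList < base_date.toList then pvScanA base_date rest (i + 1) else some i

def find_trading_day_offset (kline_dict : List (String × List (String × Int))) (base_date : String) (offset : Int) : Option String :=
  let sorted_dates := PySem.List.sorted (PySem.List.dedup (kline_dict.map Prod.fst)) (fun x => x.toList) false
  match pvScanA base_date sorted_dates 0 with
  | none => none
  | some i =>
      if (i : Int) + offset ≥ (sorted_dates.length : Int) then none
      else PySem.List.pyGet? sorted_dates ((i : Int) + offset)   -- Python list indexing; none = IndexError, excluded by Pre_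

-- ===== PORT B =====
-- B's `while lo < hi` binary-search loop; mid is always in range, so getD is exact here
def pvBisect (dates : List String) (base_date : String) : Nat → Nat → Nat → Nat
  | 0, lo, _ => lo
  | fuel + 1, lo, hi =>
    if lo < hi then
      if (dates.getD ((lo + hi) / 2) "").toList < base_date.toList then
        pvBisect dates base_date fuel ((lo + hi) / 2 + 1) hi
      else pvBisect dates base_date fuel lo ((lo + hi) / 2)
    else lo

def find_trading_day_offset_alt (kline_dict : List (String × List (String × Int))) (base_date : String) (offset : Int) : Option String :=
  let dates := PySem.List.sorted (PySem.List.dedup (kline_dict.map Prod.fst)) (fun x => x.toList) false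
  let lo := pvBisect dates base_date dates.length 0 dates.length
  if lo = dates.length then none
  else
    let idx : Int := (lo : Int) + offset
    if 0 ≤ idx ∧ idx < (dates.length : Int) then PySem.List.pyGet? dates idx
    else none

-- ===== PRECONDITION & SPEC =====
-- Pre_ excludes exactly the inputs where A raises IndexError: some date >= base_date exists
-- and base_idx + offset < -len(dates), an index below Python's wraparound range
-- (base_idx = the number of distinct dates below base_date).
def Pre_find_trading_day_offset (kline_dict : List (String × List (String × Int))) (base_date : String) (offset : Int) : Prop :=
  let ks := PySem.List.dedup (kline_dict.map Prod.fst)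
  let i := (ks.countP (fun k => decide (k.toList < base_date.toList)) : Int) + offset
  (∃ k ∈ ks, ¬ k.toList < base_date.toList) → -(ks.length : Int) ≤ i
instance (kline_dict : List (String × List (String × Int))) (base_date : String) (offset : Int) : Decidable (Pre_find_trading_day_offset kline_dict base_date offset) := by unfold Pre_find_trading_day_offset; infer_instance

def pvWitness_find_trading_day_offset : (List (String × List (String × Int))) × String × Int := ([("b", [])], "a", 0)

-- On inputs where a date >= base_date exists but base_idx + offset is negative yet >= -len(dates),
-- A's negative Python index wraps around and returns a date from the END of the calendar (a later
-- date despite the negative offset), while B returns None — the intended answer when there are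
-- not enough earlier trading days.
def D_find_trading_day_offset (kline_dict : List (String × List (String × Int))) (base_date : String) (offset : Int) : Prop :=
  let ks := PySem.List.dedup (kline_dict.map Prod.fst)
  let i := (ks.countP (fun k => decide (k.toList < base_date.toList)) : Int) + offset
  (∃ k ∈ ks, ¬ k.toList < base_date.toList) ∧ i < 0 ∧ -(ks.length : Int) ≤ i
instance (kline_dict : List (String × List (String × Int))) (base_date : String) (offset : Int) : Decidable (D_find_trading_day_offset kline_dict base_date offset) := by unfold D_find_trading_day_offset; infer_instance

def Spec_find_trading_day_offset (kline_dict : List (String × List (String × Int))) (base_date : String) (offset : Int) (out : Option String) : Prop := ¬ D_find_trading_day_offset kline_dict base_date offset → out = find_trading_day_offset_alt kline_dict base_date offset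
instance (kline_dict : List (String × List (String × Int))) (base_date : String) (offset : Int) (out : Option String) : Decidable (Spec_find_trading_day_offset kline_dict base_date offset out) := by unfold Spec_find_trading_day_offset; infer_instance

def pvDiffWitness_find_trading_day_offset : (List (String × List (String × Int))) × String × Int := ([("a", []), ("b", [])], "b", -2)
def pvDiffWitnessOut_find_trading_day_offset : (Option String) × (Option String) := (some "b", none)

-- ===== CLAIM (what is proved, stated in full; the proofs are below) =====
def Claim_unchanged_find_trading_day_offset : Prop := ∀ (kline_dict : List (String × List (String × Int))) (base_date : String) (offset : Int), Dom_find_trading_day_offset kline_dict base_date offset → Pre_find_trading_day_offset kline_dict base_date offset → Spec_find_trading_day_offset kline_dict base_date offset (find_trading_day_offset kline_dict base_date offset)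
def Claim_changed_find_trading_day_offset : Prop := Dom_find_trading_day_offset (pvDiffWitness_find_trading_day_offset.1) (pvDiffWitness_find_trading_day_offset.2.1) (pvDiffWitness_find_trading_day_offset.2.2) ∧ Pre_find_trading_day_offset (pvDiffWitness_find_trading_day_offset.1) (pvDiffWitness_find_trading_day_offset.2.1) (pvDiffWitness_find_trading_day_offset.2.2) ∧ D_find_trading_day_offset (pvDiffWitness_find_trading_day_offset.1) (pvDiffWitness_find_trading_day_offset.2.1) (pvDiffWitness_find_trading_day_offset.2.2) ∧ find_trading_day_offset (pvDiffWitness_find_trading_day_offset.1) (pvDiffWitness_find_trading_day_offset.2.1) (pvDiffWitness_find_trading_day_offset.2.2) = pvDiffWitnessOut_find_trading_day_offset.1 ∧ find_trading_day_offset_alt (pvDiffWitness_find_trading_day_offset.1) (pvDiffWitness_find_trading_day_offset.2.1) (pvDiffWitness_find_trading_day_offset.2.2) = pvDiffWitnessOut_find_trading_day_offset.2 ∧ pvDiffWitnessOut_find_trading_day_offset.1 ≠ pvDiffWitnessOut_find_trading_day_offset.2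
def Claim_exact_find_trading_day_offset : Prop := ∀ (kline_dict : List (String × List (String × Int))) (base_date : String) (offset : Int), Dom_find_trading_day_offset kline_dict base_date offset → Pre_find_trading_day_offset kline_dict base_date offset → D_find_trading_day_offset kline_dict base_date offset → find_trading_day_offset kline_dict base_date offset ≠ find_trading_day_offset_alt kline_dict base_date offset

-- ===== LEMMAS AND PROOFS =====

theorem pv_lt_trans {a b c : List Char} (h1 : a < b) (h2 : b < c) : a < c :=
  (List.lt_iff_lex_lt a c).mpr
    (@lt_trans (List Char) List.instLinearOrder.toPreorder a b c
      ((List.lt_iff_lex_lt a b).mp h1) ((List.lt_iff_lex_lt b c).mp h2))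

theorem pv_sorted_inst_eq (ks : List String) :
    PySem.List.sorted ks (fun x => x.toList) false
    = @PySem.List.sorted String (List Char) List.instLinearOrder.toLT LinearOrder.toDecidableLT ks (fun x => x.toList) false := by
  congr 1

-- the sorted distinct date list is strictly increasing under core `<`
theorem pv_sorted_strict (ks : List String) (hnd : ks.Nodup) :
    (PySem.List.sorted ks (fun x => x.toList) false).Pairwise (fun a b => a.toList < b.toList) := by
  have hperm : (PySem.List.sorted ks (fun x => x.toList) false).Perm ks :=
    PySem.List.sorted_perm ks (fun x => x.toList) false
  have hnd' : (PySem.List.sorted ks (fun x => x.toList) false).Nodup := hperm.nodup_iff.mpr hnd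
  have hle : (PySem.List.sorted ks (fun x => x.toList) false).Pairwise
      (fun a b => @LE.le (List Char) (List.instLinearOrder.toLE) a.toList b.toList) := by
    rw [pv_sorted_inst_eq]
    exact PySem.List.sorted_pairwise (κ := List Char) ks (fun x => x.toList)
  have := List.Pairwise.and hle hnd'
  refine this.imp ?_
  rintro a b ⟨h1, h2⟩
  exact (List.lt_iff_lex_lt _ _).mpr
    (lt_of_le_of_ne h1 (fun hc => h2 (String.toList_inj.mp hc)))

theorem pvBisect_inv (ds : List String) (bd : String)
    (hs : ∀ p q, p < q → q < ds.length → (ds.getD p "").toList < (ds.getD q "").toList) :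
    ∀ fuel lo hi, hi - lo ≤ fuel → lo ≤ hi → hi ≤ ds.length →
      (∀ j, j < lo → (ds.getD j "").toList < bd.toList) →
      (∀ j, hi ≤ j → j < ds.length → ¬ (ds.getD j "").toList < bd.toList) →
      lo ≤ pvBisect ds bd fuel lo hi ∧ pvBisect ds bd fuel lo hi ≤ hi ∧
        (∀ j, j < pvBisect ds bd fuel lo hi → (ds.getD j "").toList < bd.toList) ∧
        (∀ j, pvBisect ds bd fuel lo hi ≤ j → j < ds.length → ¬ (ds.getD j "").toList < bd.toList) := by
  intro fuel
  induction fuel with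
  | zero =>
    intro lo hi hn hlh hhl hlow hhigh
    have : lo = hi := by omega
    exact ⟨le_refl _, le_of_eq this, hlow, fun j hj hjl => hhigh j (this ▸ hj) hjl⟩
  | succ fuel ih =>
    intro lo hi hn hlh hhl hlow hhigh
    rw [pvBisect]
    split_ifs with h hm
    · have := ih ((lo + hi) / 2 + 1) hi (by omega) (by omega) hhl
        (fun j hj => by
          rcases Nat.lt_or_ge j ((lo + hi) / 2) with hj' | hj'
          · exact pv_lt_trans (hs j _ hj' (by omega)) hm
          · have : j = (lo + hi) / 2 := by omega
            rw [this]; exact hm)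
        hhigh
      exact ⟨by omega, this.2.1, this.2.2⟩
    · have := ih lo ((lo + hi) / 2) (by omega) (by omega) (by omega) hlow
        (fun j hj hjl hc => by
          rcases Nat.lt_or_ge ((lo + hi) / 2) j with hj' | hj'
          · exact hm (pv_lt_trans (hs _ j hj' hjl) hc)
          · have : j = (lo + hi) / 2 := by omega
            rw [this] at hc; exact hm hc)
      exact ⟨this.1, by omega, this.2.2⟩
    · have : lo = hi := by omega
      exact ⟨le_refl _, le_of_eq this, hlow, fun j hj hjl => hhigh j (this ▸ hj) hjl⟩

-- A's scan, characterised by a split point r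
theorem pvScanA_of_split (bd : String) :
    ∀ (ds : List String) (s r : Nat), r ≤ ds.length →
      (∀ j, j < r → (ds.getD j "").toList < bd.toList) →
      (∀ j, r ≤ j → j < ds.length → ¬ (ds.getD j "").toList < bd.toList) →
      pvScanA bd ds s = if r < ds.length then some (s + r) else none := by
  intro ds
  induction ds with
  | nil => intro s r hr _ _; simp [pvScanA] at *
  | cons d rest ih =>
    intro s r hr hlow hhigh
    rw [pvScanA]
    by_cases hd : d.toList < bd.toList
    · have hr0 : 0 < r := by
        rcases Nat.eq_zero_or_pos r with h0 | h0
        · exact absurd hd (by simpa using hhigh 0 (by omega) (by simp))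
        · exact h0
      have := ih (s + 1) (r - 1) (by simp at hr; omega)
        (fun j hj => by simpa using hlow (j + 1) (by omega))
        (fun j hj hjl => by simpa using hhigh (j + 1) (by omega) (by simp; omega))
      rw [if_pos hd, this]
      simp only [List.length_cons]
      by_cases hrl : r < rest.length + 1
      · rw [if_pos (by omega), if_pos hrl]
        congr 1
        omega
      · rw [if_neg (by omega), if_neg hrl]
    · have hr0 : r = 0 := by
        by_contra hne
        exact absurd (hlow 0 (by omega)) (by simpa using hd)
      simp [hd, hr0]

-- the split point counts the elements below bd
theorem countP_of_split (bd : String) (ds : List String) (r : Nat) (hr : r ≤ ds.length)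
    (hlow : ∀ j, j < r → (ds.getD j "").toList < bd.toList)
    (hhigh : ∀ j, r ≤ j → j < ds.length → ¬ (ds.getD j "").toList < bd.toList) :
    ds.countP (fun k => decide (k.toList < bd.toList)) = r := by
  have hsplit : ds = ds.take r ++ ds.drop r := (List.take_append_drop r ds).symm
  rw [hsplit, List.countP_append]
  have h1 : (ds.take r).countP (fun k => decide (k.toList < bd.toList)) = (ds.take r).length := by
    apply List.countP_eq_length.mpr
    intro a ha
    rcases List.mem_iff_getElem.mp ha with ⟨j, hj, rfl⟩
    have hjd : j < ds.length := by rw [List.length_take] at hj; omega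
    have hjr : j < r := by rw [List.length_take] at hj; omega
    have h := hlow j hjr
    rw [List.getD_eq_getElem ds "" hjd] at h
    rw [List.getElem_take, decide_eq_true_eq]
    exact h
  have h2 : (ds.drop r).countP (fun k => decide (k.toList < bd.toList)) = 0 := by
    apply List.countP_eq_zero.mpr
    intro a ha
    rcases List.mem_iff_getElem.mp ha with ⟨j, hj, rfl⟩
    have hjl : r + j < ds.length := by rw [List.length_drop] at hj; omega
    have h := hhigh (r + j) (by omega) hjl
    rw [List.getD_eq_getElem ds "" hjl] at h
    rw [List.getElem_drop]
    simpa using h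
  rw [h1, h2, List.length_take]
  omega

-- main agreement theorem
theorem pv_main (kd : List (String × List (String × Int))) (bd : String) (off : Int)
    (hpre : Pre_find_trading_day_offset kd bd off)
    (hnd : ¬ D_find_trading_day_offset kd bd off) :
    find_trading_day_offset kd bd off = find_trading_day_offset_alt kd bd off := by
  unfold find_trading_day_offset find_trading_day_offset_alt
  set ks := PySem.List.dedup (kd.map Prod.fst) with hks
  set ds := PySem.List.sorted ks (fun x => x.toList) false with hds
  have hperm : ds.Perm ks := PySem.List.sorted_perm ks (fun x => x.toList) false
  have hlen : ds.length = ks.length := hperm.length_eq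
  have hcnt : ds.countP (fun k => decide (k.toList < bd.toList)) = ks.countP (fun k => decide (k.toList < bd.toList)) :=
    hperm.countP_eq _
  have hsorted : ds.Pairwise (fun a b => a.toList < b.toList) :=
    pv_sorted_strict ks (by rw [hks]; exact PySem.List.nodup_dedup _)
  have hmono : ∀ p q, p < q → q < ds.length → (ds.getD p "").toList < (ds.getD q "").toList := by
    intro p q hpq hq
    rw [List.getD_eq_getElem ds "" (by omega), List.getD_eq_getElem ds "" hq]
    exact List.pairwise_iff_getElem.mp hsorted p q (by omega) hq hpq
  set r := pvBisect ds bd ds.length 0 ds.length with hr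
  obtain ⟨-, hrle, hlow, hhigh⟩ := pvBisect_inv ds bd hmono ds.length 0 ds.length (by omega)
    (by omega) (le_refl _) (fun j hj => absurd hj (by omega)) (fun j hj hjl => absurd hjl (by omega))
  have hscan : pvScanA bd ds 0 = if r < ds.length then some (0 + r) else none :=
    pvScanA_of_split bd ds 0 r hrle hlow hhigh
  dsimp only
  have hcr : ks.countP (fun k => decide (k.toList < bd.toList)) = r := by
    rw [← hcnt]; exact countP_of_split bd ds r hrle hlow hhigh
  by_cases hrlt : r < ds.length
  · rw [hscan, if_pos hrlt]
    simp only [Nat.zero_add]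
    have hdr : ¬ (ds.getD r "").toList < bd.toList := hhigh r (le_refl _) hrlt
    have hex : ∃ k ∈ ks, ¬ k.toList < bd.toList := by
      refine ⟨ds.getD r "", ?_, hdr⟩
      exact hperm.mem_iff.mp (by
        rw [List.getD_eq_getElem ds "" hrlt]; exact List.getElem_mem hrlt)
    by_cases hge : (r : Int) + off ≥ (ds.length : Int)
    · rw [if_pos hge, if_neg (by omega), if_neg (by omega)]
    · rw [if_neg hge, if_neg (by omega)]
      by_cases hok : 0 ≤ (r : Int) + off ∧ (r : Int) + off < (ds.length : Int)
      · rw [if_pos hok]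
      · exfalso
        apply hnd
        refine ⟨hex, ?_, ?_⟩
        · rw [hcr]; push_cast at hge hok ⊢; omega
        · have := hpre hex
          rw [hcr] at this
          rw [hcr]; push_cast at this ⊢; omega
  · rw [hscan, if_neg hrlt]
    rw [if_pos (by omega)]

-- ===== VERDICT (by name: the statement is the Claim_ definition above) =====
theorem find_trading_day_offset_spec : Claim_unchanged_find_trading_day_offset := by
  intro kd bd off _ hpre hnd
  exact pv_main kd bd off hpre hnd

theorem find_trading_day_offset_changed : Claim_changed_find_trading_day_offset := by
  unfold Claim_changed_find_trading_day_offset; decide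

theorem find_trading_day_offset_tight : Claim_exact_find_trading_day_offset := by
  intro kd bd off _ hpre hd
  unfold find_trading_day_offset find_trading_day_offset_alt
  set ks := PySem.List.dedup (kd.map Prod.fst) with hks
  set ds := PySem.List.sorted ks (fun x => x.toList) false with hds
  have hperm : ds.Perm ks := PySem.List.sorted_perm ks (fun x => x.toList) false
  have hlen : ds.length = ks.length := hperm.length_eq
  have hcnt : ds.countP (fun k => decide (k.toList < bd.toList)) = ks.countP (fun k => decide (k.toList < bd.toList)) :=
    hperm.countP_eq _
  have hsorted : ds.Pairwise (fun a b => a.toList < b.toList) :=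
    pv_sorted_strict ks (by rw [hks]; exact PySem.List.nodup_dedup _)
  have hmono : ∀ p q, p < q → q < ds.length → (ds.getD p "").toList < (ds.getD q "").toList := by
    intro p q hpq hq
    rw [List.getD_eq_getElem ds "" (by omega), List.getD_eq_getElem ds "" hq]
    exact List.pairwise_iff_getElem.mp hsorted p q (by omega) hq hpq
  set r := pvBisect ds bd ds.length 0 ds.length with hr
  obtain ⟨-, hrle, hlow, hhigh⟩ := pvBisect_inv ds bd hmono ds.length 0 ds.length (by omega)
    (by omega) (le_refl _) (fun j hj => absurd hj (by omega)) (fun j hj hjl => absurd hjl (by omega))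
  have hscan : pvScanA bd ds 0 = if r < ds.length then some (0 + r) else none :=
    pvScanA_of_split bd ds 0 r hrle hlow hhigh
  dsimp only
  have hcr : ks.countP (fun k => decide (k.toList < bd.toList)) = r := by
    rw [← hcnt]; exact countP_of_split bd ds r hrle hlow hhigh
  obtain ⟨hex, hneg, hwrap⟩ := hd
  have hlen2 : (PySem.List.dedup (kd.map Prod.fst)).length = ks.length := by rw [hks]
  rw [hcr] at hneg hwrap
  have hrlt : r < ds.length := by
    rcases hex with ⟨k, hk, hbk⟩
    by_contra hge
    rcases List.mem_iff_getElem.mp (hperm.mem_iff.mpr hk) with ⟨j, hj, rfl⟩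
    have h := hlow j (by omega)
    rw [List.getD_eq_getElem ds "" hj] at h
    exact hbk h
  rw [hscan, if_pos hrlt]
  simp only [Nat.zero_add]
  rw [if_neg (by push_cast at hneg ⊢; omega), if_neg (by omega),
    if_neg (by push_cast at hneg ⊢; omega)]
  intro hcontra
  have hin : PySem.List.pyGet? ds ((r : Int) + off) ≠ none := by
    rw [Ne, PySem.List.pyGet?_eq_none_iff]
    intro hnr
    apply hnr
    constructor
    · push_cast at hwrap ⊢; omega
    · push_cast; omega
  exact hin hcontra
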